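-- pv_equiv track=rewrite | github.com/arceryz/heart-4color | dreducecode/app.py | alfacoloring
-- ===== SOURCE A (Python) =====
-- def alfacoloring(coloring) -> str:
--     colorsleft = [ "a", "b", "c", "d" ]
--     mapping = {}
--
--     stringcol = ""
--     for x in coloring:
--         if x not in mapping:
--             mapping[x] = colorsleft.pop(0)
--         stringcol += mapping[x]
--
--     return stringcol
-- ===== SOURCE B (Python) =====
-- def alfacoloring(coloring) -> str:
--     n = len(coloring)
--     out = [None] * n
--     k = 0
--     for j in range(n):
--         if out[j] is None:
--             c = "abcd"[k]
--             k += 1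
--             v = coloring[j]
--             for i in range(j, n):
--                 if coloring[i] == v:
--                     out[i] = c
--     return "".join(out)
-- ===== Notes on version B (the rewrite author's own statement) =====
-- stated objective: alternative
-- what changed: Instead of translating the input element by element through a symbol-to-letter dictionary fed from a pop-from-front letter pool, B flood-fills by colour class: it scans for each still-unlabelled position (a first occurrence), draws the next letter, and marks every later position holding the same value in one sweep, then joins the filled array; there is no dictionary and no per-element lookup.
import Mathlib
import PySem

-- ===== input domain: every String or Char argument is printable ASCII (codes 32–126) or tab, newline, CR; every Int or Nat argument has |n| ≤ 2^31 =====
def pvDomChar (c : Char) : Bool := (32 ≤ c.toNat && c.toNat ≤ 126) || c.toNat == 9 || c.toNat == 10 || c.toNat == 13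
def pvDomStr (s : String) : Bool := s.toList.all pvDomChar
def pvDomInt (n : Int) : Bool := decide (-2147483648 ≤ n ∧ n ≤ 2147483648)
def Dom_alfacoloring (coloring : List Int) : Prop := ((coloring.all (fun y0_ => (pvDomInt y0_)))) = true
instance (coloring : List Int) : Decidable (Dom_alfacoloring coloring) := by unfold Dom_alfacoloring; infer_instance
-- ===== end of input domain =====

-- B replaces A's element-by-element translation through a symbol→letter dictionary (fed from a
-- pop-from-front letter pool) by a flood-fill over colour classes: scan for each still-unlabelled
-- position (a first occurrence), draw the next letter, and mark every later position holding the
-- same value in one sweep, then join the filled array (objective: alternative; no dictionary at all).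

-- ===== PORT A =====
-- the loop 'for x in coloring', carrying (colorsleft, mapping, stringcol)
def alfaLoop : List Int → List String → PySem.Dict Int String → String → String
  | [], _, _, s => s
  | x :: xs, left, m, s =>
    if m.contains x then
      alfaLoop xs left m (s ++ m.getD x "")
    else
      match left with
      | [] => s   -- Python: colorsleft.pop(0) raises IndexError here; excluded by Pre_
      | v :: rest => alfaLoop xs rest (m.insert x v) (s ++ (m.insert x v).getD x "")

def alfacoloring (coloring : List Int) : String :=
  alfaLoop coloring ["a", "b", "c", "d"] PySem.Dict.empty ""

-- ===== PORT B =====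
-- flood-fill: out = [None]*n; for each j with out[j] still None, take the next letter "abcd"[k]
-- and set out[i] for every i ≥ j with coloring[i] == coloring[j]; finally "".join(out).
def alfacoloring_alt (coloring : List Int) : String :=
  let n : Int := (coloring.length : Int)
  let res := (PySem.List.pyRange 0 n 1).foldl
    (fun (st : List (Option Char) × Int) j =>
      if (PySem.List.pyGetD st.1 j (some ' ')).isNone then
        let c : Char := (PySem.Str.pyGet? "abcd" st.2).getD ' '   -- "abcd"[k]; none = IndexError, unreachable under Pre_
        let v : Int := PySem.List.pyGetD coloring j 0
        ((PySem.List.pyRange j n 1).foldl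
            (fun o i => if PySem.List.pyGetD coloring i 0 == v then PySem.List.pySetD o i (some c) else o)
            st.1,
         st.2 + 1)
      else st)
    (List.replicate coloring.length (none : Option Char), 0)
  String.ofList (res.1.map (fun o => o.getD ' '))   -- "".join(out); a None here is Python's TypeError, unreachable under Pre_

-- ===== PRECONDITION & SPEC =====
-- Pre_ excludes exactly the inputs with five or more distinct values, on which A raises
-- IndexError (pop(0) on the exhausted letter pool); B raises IndexError there too ("abcd"[4]).
def Pre_alfacoloring (coloring : List Int) : Prop :=
  (PySem.List.dedup coloring).length ≤ 4
instance (coloring : List Int) : Decidable (Pre_alfacoloring coloring) := by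
  unfold Pre_alfacoloring; infer_instance

def pvWitness_alfacoloring : List Int := [7, -2, 7, 0]

def Spec_alfacoloring (coloring : List Int) (out : String) : Prop := out = alfacoloring_alt coloring
instance (coloring : List Int) (out : String) : Decidable (Spec_alfacoloring coloring out) := by unfold Spec_alfacoloring; infer_instance

-- ===== CLAIM (what is proved, stated in full; the proofs are below) =====
def Claim_equal_alfacoloring : Prop := ∀ (coloring : List Int), Dom_alfacoloring coloring → Pre_alfacoloring coloring → Spec_alfacoloring coloring (alfacoloring coloring)

-- ===== LEMMAS AND PROOFS =====

-- "abcd"[i] as a 1-character string (A's pool letters, indexed)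
def altLetter (i : Int) : String :=
  match PySem.Str.pyGet? "abcd" i with
  | some c => String.ofList [c]
  | none => ""

-- the canonical letter of x with respect to the full input: its index in the ordered dedup
def canonLetter (full : List Int) (x : Int) : String :=
  altLetter ((PySem.Set.ofList full).idxOf x)

-- the canonical character of x (same letter, as a Char)
def chrF (full : List Int) (x : Int) : Char :=
  "abcd".toList.getD ((PySem.Set.ofList full).idxOf x) ' '

-- B's out array after the outer loop has processed positions 0..m-1
def outSpec (coloring : List Int) (m : Nat) : List (Option Char) :=
  coloring.map (fun x => if x ∈ coloring.take m then some (chrF coloring x) else none)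

-- "".join splits off its head
theorem join_empty_cons (a : String) (l : List String) :
    PySem.Str.join "" (a :: l) = a ++ PySem.Str.join "" l := by
  cases l with
  | nil =>
    simp [PySem.Str.join, PySem.Chars.join_singleton, PySem.Chars.join_nil,
      String.ofList_toList, String.append_empty]
  | cons b t =>
    simp only [PySem.Str.join, List.map]
    rw [PySem.Chars.join_cons_cons]
    simp [String.ofList_append, String.ofList_toList]

-- a Set is a prefix of any update of it
theorem set_prefix_update {s : PySem.Set Int} (l : List Int) :
    s <+: PySem.Set.update s l := by
  induction l generalizing s with
  | nil => simp [PySem.Set.update]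
  | cons y t ih =>
    have h1 : s <+: PySem.Set.add s y := by
      unfold PySem.Set.add
      split
      · exact List.prefix_refl s
      · exact ⟨[y], rfl⟩
    have h2 : PySem.Set.add s y <+: PySem.Set.update (PySem.Set.add s y) t := ih
    have : PySem.Set.update s (y :: t) = PySem.Set.update (PySem.Set.add s y) t := rfl
    rw [this]
    exact h1.trans h2

theorem ofList_append_eq_update (pre l : List Int) :
    PySem.Set.ofList (pre ++ l) = PySem.Set.update (PySem.Set.ofList pre) l := by
  simp [PySem.Set.ofList_eq_foldl, PySem.Set.update, List.foldl_append]

-- index of x in P ++ x :: t when x ∉ P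
theorem idxOf_middle (P : List Int) (x : Int) (t : List Int) (hx : x ∉ P) :
    (P ++ x :: t).idxOf x = P.length := by
  rw [List.idxOf_append]
  simp [hx, List.idxOf_cons_self]

-- the four pool letters are the first four canonical letters
theorem altLetter_eq_letters (k : Nat) (hk : k < 4) :
    altLetter (k : Int) = (["a", "b", "c", "d"] : List String).getD k "" := by
  interval_cases k <;> decide

-- the pool letter k, as the 1-char string of the k-th char of "abcd"
theorem altLetter_eq_char (k : Nat) (hk : k < 4) :
    altLetter (k : Int) = String.ofList ["abcd".toList.getD k ' '] := by
  interval_cases k <;> decide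

-- B's "abcd"[k] for k < 4
theorem pyGet_abcd (k : Nat) (hk : k < 4) :
    (PySem.Str.pyGet? "abcd" (k : Int)).getD ' ' = "abcd".toList.getD k ' ' := by
  interval_cases k <;> decide

-- the main loop invariant of A
theorem loopA_eq (full : List Int) (hlen : (PySem.Set.ofList full).length ≤ 4) :
    ∀ (xs pre : List Int) (m : PySem.Dict Int String) (s : String),
    full = pre ++ xs →
    m.keys = PySem.Set.ofList pre →
    (∀ x ∈ PySem.Set.ofList pre, m.getD x "" = canonLetter full x) →
    alfaLoop xs (List.drop (PySem.Set.ofList pre).length ["a", "b", "c", "d"]) m s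
      = s ++ PySem.Str.join "" (xs.map (canonLetter full)) := by
  intro xs
  induction xs with
  | nil =>
    intro pre m s _ _ _
    simp [alfaLoop, PySem.Str.join, PySem.Chars.join_nil, String.ofList_nil,
      String.append_empty]
  | cons x xs ih =>
    intro pre m s hfull hkeys hgetD
    set P := PySem.Set.ofList pre with hP
    have hP' : PySem.Set.ofList (pre ++ [x]) = PySem.Set.add P x := by
      rw [ofList_append_eq_update]; rfl
    have hfull' : full = (pre ++ [x]) ++ xs := by simpa using hfull
    by_cases hc : m.contains x = true
    · -- x already mapped
      have hxP : x ∈ P := by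
        have := (PySem.Dict.contains_iff_mem_keys m x).mp hc
        rwa [hkeys] at this
      have hadd : PySem.Set.add P x = P := by
        unfold PySem.Set.add
        simp [PySem.Set.contains, hxP]
      have hPeq : PySem.Set.ofList (pre ++ [x]) = P := by rw [hP', hadd]
      have hrec := ih (pre ++ [x]) m (s ++ m.getD x "") hfull'
        (by rw [hPeq]; exact hkeys) (by rw [hPeq]; exact hgetD)
      rw [hPeq] at hrec
      rw [hgetD x hxP] at hrec
      simp only [alfaLoop, hc, if_true, List.map, join_empty_cons]
      rw [hgetD x hxP, ← String.append_assoc, hrec]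
    · -- new x: pop the next letter
      have hcf : m.contains x = false := by simpa using hc
      have hxP : x ∉ P := by
        intro hmem
        exact absurd ((PySem.Dict.contains_iff_mem_keys m x).mpr (hkeys ▸ hmem)) hc
      have haddx : PySem.Set.add P x = P ++ [x] := by
        unfold PySem.Set.add
        simp [PySem.Set.contains, hxP]
      -- P ++ [x] is a prefix of the full dedup, so P.length < 4
      have hpref : (P ++ [x]) <+: PySem.Set.ofList full := by
        rw [hfull', ofList_append_eq_update, hP', haddx]
        exact set_prefix_update xs
      have hlt : P.length < 4 := by
        have := hpref.length_le
        simp at this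
        omega
      -- the next pool letter
      have hdrop : List.drop P.length (["a", "b", "c", "d"] : List String)
          = (["a", "b", "c", "d"] : List String)[P.length]'(by simpa using hlt)
            :: List.drop (P.length + 1) ["a", "b", "c", "d"] := by
        exact List.drop_eq_getElem_cons (by simpa using hlt)
      set v := (["a", "b", "c", "d"] : List String)[P.length]'(by simpa using hlt) with hv
      -- the popped letter is x's canonical letter
      have hcanon : canonLetter full x = v := by
        obtain ⟨t, ht⟩ := hpref
        unfold canonLetter
        rw [← ht, List.append_assoc, List.singleton_append,
          idxOf_middle P x t hxP, hv]
        rw [altLetter_eq_letters P.length hlt]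
        exact List.getD_eq_getElem _ _ (by simpa using hlt)
      have hkeys' : (m.insert x v).keys = PySem.Set.ofList (pre ++ [x]) := by
        rw [PySem.Dict.keys_insert_of_not_contains m v hcf, hkeys, hP', haddx]
      have hgetD' : ∀ y ∈ PySem.Set.ofList (pre ++ [x]),
          (m.insert x v).getD y "" = canonLetter full y := by
        intro y hy
        rw [hP', haddx] at hy
        rcases List.mem_append.mp hy with hyP | hyx
        · have hne : y ≠ x := fun h => hxP (h ▸ hyP)
          rw [PySem.Dict.getD_insert_of_ne m v "" hne]
          exact hgetD y hyP
        · have : y = x := by simpa using hyx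
          subst this
          rw [PySem.Dict.getD_insert_self, hcanon]
      have hrec := ih (pre ++ [x]) (m.insert x v)
        (s ++ (m.insert x v).getD x "") hfull' hkeys' hgetD'
      have hlen' : (PySem.Set.ofList (pre ++ [x])).length = P.length + 1 := by
        rw [hP', haddx]; simp
      rw [hlen'] at hrec
      rw [PySem.Dict.getD_insert_self] at hrec
      simp only [alfaLoop, hcf, Bool.false_eq_true, if_false, hdrop, List.map,
        join_empty_cons, hcanon, PySem.Dict.getD_insert_self]
      rw [← String.append_assoc]
      exact hrec

-- join of 1-character strings is ofList of the characters
theorem join_singletons (g : Int → Char) :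
    ∀ (xs : List Int),
    PySem.Str.join "" (xs.map (fun x => String.ofList [g x])) = String.ofList (xs.map g) := by
  intro xs
  induction xs with
  | nil => rfl
  | cons x t ih =>
    simp only [List.map]
    rw [join_empty_cons, ih, ← String.ofList_append]
    rfl

-- (l.set n x).take (n+1) splits as take n ++ [x]
theorem take_succ_set (l : List (Option Char)) (n : Nat) (x : Option Char) (h : n < l.length) :
    (l.set n x).take (n+1) = l.take n ++ [x] := by
  rw [List.set_eq_take_append_cons_drop, if_pos h, List.take_append]
  simp [List.length_take, Nat.min_eq_left (Nat.le_of_lt h)]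

theorem drop_succ_set (l : List (Option Char)) (n : Nat) (x : Option Char) (h : n < l.length) :
    (l.set n x).drop (n+1) = l.drop (n+1) := by
  rw [List.set_eq_take_append_cons_drop, if_pos h, List.drop_append]
  simp [List.length_take, Nat.min_eq_left (Nat.le_of_lt h)]

theorem take_succ_getElem (l : List (Option Char)) (n : Nat) (h : n < l.length) :
    l.take (n+1) = l.take n ++ [l[n]] := by
  rw [List.take_add_one]; simp [List.getElem?_eq_getElem h]

-- B's inner loop: mark positions a.. whose colour equals v
theorem fill_eq (coloring : List Int) (v : Int) (c : Char) :
    ∀ (d a : Nat) (out : List (Option Char)), a + d = coloring.length →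
    out.length = coloring.length →
    (PySem.List.pyRange (a : Int) (coloring.length : Int) 1).foldl
      (fun o i => if PySem.List.pyGetD coloring i 0 == v then PySem.List.pySetD o i (some c) else o) out
    = out.take a ++ List.zipWith (fun o x => if x = v then some c else o) (out.drop a) (coloring.drop a) := by
  intro d
  induction d with
  | zero =>
    intro a out ha hlen
    rw [PySem.List.pyRange_one_eq_nil (by omega)]
    simp [List.drop_of_length_le (by omega : out.length ≤ a),
      List.take_of_length_le (by omega : out.length ≤ a)]
  | succ d ih =>
    intro a out ha hlen
    have halt : a < coloring.length := by omega
    rw [PySem.List.pyRange_one_cons (by exact_mod_cast halt)]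
    simp only [List.foldl_cons]
    have hgc : PySem.List.pyGetD coloring (a : Int) 0 = coloring[a] := by
      simp [List.getElem?_eq_getElem halt]
    have hdo : out.drop a = out[a]'(by omega) :: out.drop (a+1) :=
      List.drop_eq_getElem_cons (by omega)
    have hdc : coloring.drop a = coloring[a] :: coloring.drop (a+1) :=
      List.drop_eq_getElem_cons halt
    have hcast : ((a : Int) + 1) = ((a + 1 : Nat) : Int) := by push_cast; ring
    by_cases hv : coloring[a] = v
    · have hbeq : (PySem.List.pyGetD coloring (a : Int) 0 == v) = true := by
        rw [hgc]; exact beq_iff_eq.mpr hv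
      rw [hbeq, if_pos rfl]
      have hset : PySem.List.pySetD out (a : Int) (some c) = out.set a (some c) := by
        simp
      rw [hset, hcast, ih (a+1) (out.set a (some c)) (by omega) (by simpa using hlen)]
      rw [take_succ_set out a (some c) (by omega), drop_succ_set out a (some c) (by omega)]
      rw [hdo, hdc]
      simp only [List.zipWith_cons_cons, if_pos hv, List.append_assoc, List.singleton_append]
    · have hbeq : (PySem.List.pyGetD coloring (a : Int) 0 == v) = false := by
        rw [hgc]; exact beq_eq_false_iff_ne.mpr hv
      rw [hbeq]
      simp only [Bool.false_eq_true, if_false]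
      rw [hcast, ih (a+1) out (by omega) hlen]
      rw [take_succ_getElem out a (by omega), hdo, hdc]
      simp only [List.zipWith_cons_cons, if_neg hv, List.append_assoc, List.singleton_append]

-- B's outer loop invariant
theorem outer_eq (coloring : List Int) (hlen4 : (PySem.Set.ofList coloring).length ≤ 4) :
    ∀ (d m : Nat), m + d = coloring.length →
    (PySem.List.pyRange (m : Int) ((coloring.length : Int)) 1).foldl
      (fun (st : List (Option Char) × Int) j =>
        if (PySem.List.pyGetD st.1 j (some ' ')).isNone then
          ((PySem.List.pyRange j ((coloring.length : Int)) 1).foldl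
              (fun o i => if PySem.List.pyGetD coloring i 0 == PySem.List.pyGetD coloring j 0 then
                  PySem.List.pySetD o i (some ((PySem.Str.pyGet? "abcd" st.2).getD ' ')) else o)
              st.1,
           st.2 + 1)
        else st)
      (outSpec coloring m, ((PySem.Set.ofList (coloring.take m)).length : Int))
    = (outSpec coloring coloring.length, ((PySem.Set.ofList coloring).length : Int)) := by
  intro d
  induction d with
  | zero =>
    intro m hm
    rw [PySem.List.pyRange_one_eq_nil (by omega)]
    simp only [List.foldl_nil]
    have hm' : m = coloring.length := by omega
    subst hm'
    rw [List.take_length]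
  | succ d ih =>
    intro m hm
    have hmlt : m < coloring.length := by omega
    rw [PySem.List.pyRange_one_cons (by exact_mod_cast hmlt)]
    simp only [List.foldl_cons]
    have hlenout : (outSpec coloring m).length = coloring.length := by
      simp [outSpec]
    have hget : PySem.List.pyGetD (outSpec coloring m) (m : Int) (some ' ')
        = (if coloring[m] ∈ coloring.take m then some (chrF coloring coloring[m]) else none) := by
      have : PySem.List.pyGetD (outSpec coloring m) (m : Int) (some ' ')
          = (outSpec coloring m)[m]'(by omega) := by
        simp [List.getElem?_eq_getElem (by omega : m < (outSpec coloring m).length)]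
      rw [this]
      simp [outSpec]
    have hcast : ((m : Int) + 1) = ((m + 1 : Nat) : Int) := by push_cast; ring
    have htakes : coloring.take (m+1) = coloring.take m ++ [coloring[m]] := by
      rw [List.take_add_one]; simp [List.getElem?_eq_getElem hmlt]
    by_cases hmem : coloring[m] ∈ coloring.take m
    · -- position m already labelled: state unchanged
      rw [hget, if_pos hmem]
      simp only [Option.isNone_some, Bool.false_eq_true, if_false]
      have hout : outSpec coloring (m+1) = outSpec coloring m := by
        unfold outSpec
        apply List.map_congr_left
        intro x _
        by_cases hx : x ∈ coloring.take m
        · rw [if_pos hx, if_pos (by rw [htakes]; exact List.mem_append_left _ hx)]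
        · rw [if_neg hx, if_neg ?_]
          intro hx1
          rw [htakes] at hx1
          rcases List.mem_append.mp hx1 with h | h
          · exact hx h
          · have : x = coloring[m] := by simpa using h
            exact hx (this ▸ hmem)
      have hsets : PySem.Set.ofList (coloring.take (m+1)) = PySem.Set.ofList (coloring.take m) := by
        rw [htakes, ofList_append_eq_update]
        show PySem.Set.add _ _ = _
        unfold PySem.Set.add
        simp [PySem.Set.contains, (PySem.Set.mem_ofList _ _).mpr hmem]
      have := ih (m+1) (by omega)
      rw [hout, hsets] at this
      rw [hcast]
      exact this
    · -- a first occurrence: draw letter k and flood-fill the class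
      rw [hget, if_neg hmem]
      simp only [Option.isNone_none, if_true]
      set P := PySem.Set.ofList (coloring.take m) with hPdef
      have hxP : coloring[m] ∉ P := fun h => hmem ((PySem.Set.mem_ofList _ _).mp h)
      have haddx : PySem.Set.ofList (coloring.take (m+1)) = P ++ [coloring[m]] := by
        rw [htakes, ofList_append_eq_update]
        show PySem.Set.add _ _ = _
        unfold PySem.Set.add
        simp [PySem.Set.contains, hmem]
        rw [hPdef]
      have hpref : (P ++ [coloring[m]]) <+: PySem.Set.ofList coloring := by
        have hsplit : PySem.Set.ofList coloring
            = PySem.Set.update (PySem.Set.ofList (coloring.take (m+1))) (coloring.drop (m+1)) := by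
          conv_lhs => rw [← List.take_append_drop (m+1) coloring]
          rw [ofList_append_eq_update]
        rw [← haddx, hsplit]
        exact set_prefix_update _
      have hk4 : P.length < 4 := by
        have hle := hpref.length_le
        simp only [List.length_append, List.length_singleton] at hle
        omega
      have hchr : chrF coloring coloring[m] = "abcd".toList.getD P.length ' ' := by
        obtain ⟨t, ht⟩ := hpref
        unfold chrF
        rw [← ht, List.append_assoc, List.singleton_append, idxOf_middle P coloring[m] t hxP]
      have hc : (PySem.Str.pyGet? "abcd" (P.length : Int)).getD ' ' = chrF coloring coloring[m] := by
        rw [pyGet_abcd P.length hk4, hchr]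
      have hv : PySem.List.pyGetD coloring (m : Int) 0 = coloring[m] := by
        simp [List.getElem?_eq_getElem hmlt]
      -- inner fill result
      have hfill := fill_eq coloring (PySem.List.pyGetD coloring (m : Int) 0)
        ((PySem.Str.pyGet? "abcd" (P.length : Int)).getD ' ') (d+1) m (outSpec coloring m)
        (by omega) hlenout
      have hfill' : (PySem.List.pyRange (m : Int) ((coloring.length : Int)) 1).foldl
          (fun o i => if PySem.List.pyGetD coloring i 0 == PySem.List.pyGetD coloring (m : Int) 0 then
              PySem.List.pySetD o i (some ((PySem.Str.pyGet? "abcd" (P.length : Int)).getD ' ')) else o)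
          (outSpec coloring m) = outSpec coloring (m+1) := by
        rw [hfill, hv, hc]
        -- turn take/zipWith into the m+1 map formula
        unfold outSpec
        rw [← List.map_take, ← List.map_drop, List.zipWith_map_left, List.zipWith_self]
        have hsplitmap : ∀ (g : Int → Option Char),
            coloring.map g = (coloring.take m).map g ++ (coloring.drop m).map g := by
          intro g; rw [← List.map_append, List.take_append_drop]
        rw [hsplitmap (fun x => if x ∈ coloring.take (m+1) then some (chrF coloring x) else none)]
        congr 1
        · apply List.map_congr_left
          intro x hx
          rw [if_pos hx, if_pos (by rw [htakes]; exact List.mem_append_left _ hx)]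
        · apply List.map_congr_left
          intro x _
          by_cases hxv : x = coloring[m]
          · subst hxv
            rw [if_pos rfl, if_pos (by rw [htakes]; exact List.mem_append_right _ (by simp))]
          · rw [if_neg hxv]
            by_cases hx : x ∈ coloring.take m
            · rw [if_pos hx, if_pos (by rw [htakes]; exact List.mem_append_left _ hx)]
            · rw [if_neg hx, if_neg ?_]
              intro hx1
              rw [htakes] at hx1
              rcases List.mem_append.mp hx1 with h | h
              · exact hx h
              · exact hxv (by simpa using h)
      have hklen : (PySem.Set.ofList (coloring.take (m+1))).length = P.length + 1 := by
        rw [haddx]; simp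
      have := ih (m+1) (by omega)
      rw [hcast, hfill']
      rw [hklen] at this
      push_cast at this ⊢
      exact this

-- the initial out array is outSpec 0
theorem outSpec_zero (coloring : List Int) :
    outSpec coloring 0 = List.replicate coloring.length (none : Option Char) := by
  unfold outSpec
  simp

-- ===== VERDICT (by name: the statement is the Claim_ definition above) =====
theorem alfacoloring_spec : Claim_equal_alfacoloring := by
  intro coloring _ hpre
  unfold Spec_alfacoloring
  have hlen : (PySem.Set.ofList coloring).length ≤ 4 := by
    have := hpre
    unfold Pre_alfacoloring at this
    simpa [PySem.List.dedup_eq_ofList] using this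
  -- A's value: the join of the canonical letters
  have hA : alfacoloring coloring = PySem.Str.join "" (coloring.map (canonLetter coloring)) := by
    unfold alfacoloring
    have hmain := loopA_eq coloring hlen coloring [] PySem.Dict.empty ""
      (by simp) (by simp [PySem.Dict.keys_empty, PySem.Set.ofList]) (by intro x hx; simp [PySem.Set.ofList] at hx)
    have h0 : (PySem.Set.ofList ([] : List Int)).length = 0 := rfl
    rw [h0, List.drop_zero] at hmain
    rw [hmain, String.empty_append]
  -- the canonical letters are the canonical characters
  have hidx : ∀ x ∈ coloring, (PySem.Set.ofList coloring).idxOf x < 4 := by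
    intro x hx
    have : (PySem.Set.ofList coloring).idxOf x < (PySem.Set.ofList coloring).length :=
      List.idxOf_lt_length_of_mem ((PySem.Set.mem_ofList _ _).mpr hx)
    omega
  have hAchars : alfacoloring coloring = String.ofList (coloring.map (chrF coloring)) := by
    rw [hA, show coloring.map (canonLetter coloring)
        = coloring.map (fun x => String.ofList [chrF coloring x]) from
      List.map_congr_left (fun x hx => by
        unfold canonLetter chrF
        exact altLetter_eq_char _ (hidx x hx))]
    exact join_singletons (chrF coloring) coloring
  -- B's value: the same characters
  have hB : alfacoloring_alt coloring = String.ofList (coloring.map (chrF coloring)) := by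
    unfold alfacoloring_alt
    simp only []
    have h0 := outer_eq coloring hlen coloring.length 0 (by omega)
    rw [outSpec_zero] at h0
    have h0' : ((PySem.Set.ofList (coloring.take 0)).length : Int) = 0 := by simp [PySem.Set.ofList]
    rw [h0'] at h0
    rw [show ((0 : Nat) : Int) = (0 : Int) from rfl] at h0
    rw [h0]
    congr 1
    unfold outSpec
    rw [List.map_map]
    apply List.map_congr_left
    intro x hx
    simp [hx]
  rw [hAchars, hB]
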